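-- pv_equiv track=rewrite | github.com/ExploitSage/IEEEXtreme11.0-Technomancers | MisterCounter.py | find_greater
-- ===== SOURCE A (Python) =====
-- def find_greater(l):
-- 	arr_changed = False
-- 	for i in range(len(l)-2,-1,-1):
-- 		if min(l[i+1:]) > l[i]:
-- 			for j in range(i,len(l)):
-- 				if l[j]==min(l[i+1:]):
-- 					break
-- 			temp = l[i]
-- 			l[i] = l[j]
-- 			l[j] = temp
-- 			arr_changed = True
-- 			break
-- 	if not arr_changed:
-- 		i = -1
-- 	return l,i
-- ===== SOURCE B (Python) =====
-- def find_greater(l):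
--     n = len(l)
--     if n >= 1:
--         m, jm = l[-1], n - 1          # min of the suffix l[i+1:] and its first index
--         for i in range(n - 2, -1, -1):
--             if m > l[i]:
--                 l[i], l[jm] = l[jm], l[i]
--                 return l, i
--             if l[i] <= m:
--                 m, jm = l[i], i
--     return l, -1
-- ===== Notes on version B (the rewrite author's own statement) =====
-- stated objective: faster
-- what changed: A rescans the whole suffix at every position (min(l[i+1:]) plus an inner index search); B makes a single backward pass maintaining the suffix minimum and its first index, swapping as soon as the minimum exceeds the current element.
import Mathlib
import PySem

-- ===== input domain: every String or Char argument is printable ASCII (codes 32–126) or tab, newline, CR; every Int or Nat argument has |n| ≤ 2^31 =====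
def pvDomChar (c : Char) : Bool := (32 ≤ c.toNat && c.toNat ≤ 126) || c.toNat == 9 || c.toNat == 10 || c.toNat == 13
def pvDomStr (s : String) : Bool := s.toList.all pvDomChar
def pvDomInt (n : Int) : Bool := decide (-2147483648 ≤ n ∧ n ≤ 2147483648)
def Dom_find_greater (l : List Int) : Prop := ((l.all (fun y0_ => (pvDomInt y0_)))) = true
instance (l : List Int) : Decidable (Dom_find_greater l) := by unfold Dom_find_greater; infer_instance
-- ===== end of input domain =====

-- B replaces A's quadratic rescan (min(l[i+1:]) and an inner index search at every i) by one
-- backward pass that maintains the suffix minimum and its first index; same return value.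
-- (A mutates its argument in place; the equivalence proved here is about the RETURN value only.)

-- ===== PORT A =====
-- min(xs) on a nonempty list (every call site below is nonempty)
def pyMin (xs : List Int) : Int := (PySem.List.min? xs (fun y => y)).getD 0

-- inner loop: 'for j in range(i, len(l)): if l[j]==m: break'; returns the final j
-- (all indices below are in-range nonnegative, so List.getD is exact for l[j])
def fgInner (l : List Int) (m : Int) : Nat → List Nat → Nat
  | last, [] => last
  | _, j :: rest => if l.getD j 0 = m then j else fgInner l m j rest

-- outer loop 'for i in range(len(l)-2,-1,-1)'; argument k+1 means current i = k;
-- reaching 0 means the loop ended with no break (arr_changed False), so i = -1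
def fgOuter (l : List Int) : Nat → List Int × Int
  | 0 => (l, -1)
  | k + 1 =>
    let i := k
    let m := pyMin (PySem.List.slice l (some ((i : Int) + 1)) none)   -- min(l[i+1:])
    if m > l.getD i 0 then
      let j := fgInner l m 0 (List.range' i (l.length - i))            -- range(i, len(l))
      (((l.set i (l.getD j 0)).set j (l.getD i 0)), (i : Int))
    else fgOuter l k

def find_greater (l : List Int) : List Int × Int := fgOuter l (l.length - 1)

-- ===== PORT B =====
-- one backward pass: m = min of the suffix to the right of i, jm = first index holding it;
-- argument k+1 means current i = k
def fgAlt (l : List Int) : Int → Nat → Nat → List Int × Int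
  | _, _, 0 => (l, -1)
  | m, jm, k + 1 =>
    let x := l.getD k 0
    if m > x then (((l.set k (l.getD jm 0)).set jm x), (k : Int))
    else if x ≤ m then fgAlt l x k k
    else fgAlt l m jm k

def find_greater_alt (l : List Int) : List Int × Int :=
  if l.length = 0 then (l, -1)
  else fgAlt l (l.getD (l.length - 1) 0) (l.length - 1) (l.length - 1)

-- ===== PRECONDITION & SPEC =====
def Spec_find_greater (l : List Int) (out : List Int × Int) : Prop := out = find_greater_alt l
instance (l : List Int) (out : List Int × Int) : Decidable (Spec_find_greater l out) := by unfold Spec_find_greater; infer_instance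

-- ===== CLAIM (what is proved, stated in full; the proofs are below) =====
def Claim_equal_find_greater : Prop := ∀ (l : List Int), Dom_find_greater l → Spec_find_greater l (find_greater l)

-- ===== LEMMAS AND PROOFS =====

-- invariant of B's pass at loop counter K: m is the minimum of l.drop K and jm its first index
def FGInv (l : List Int) (K : Nat) (m : Int) (jm : Nat) : Prop :=
  m = pyMin (l.drop K) ∧ K ≤ jm ∧ jm < l.length ∧ l.getD jm 0 = m ∧
    ∀ t, K ≤ t → t < jm → l.getD t 0 ≠ m

theorem pyMin_cons (x : Int) (xs : List Int) : pyMin (x :: xs) = xs.foldl min x := by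
  simp [pyMin, PySem.List.min?_id_cons]

theorem pyMin_cons_cons (x : Int) (y : Int) (xs : List Int) :
    pyMin (x :: y :: xs) = min x (pyMin (y :: xs)) := by
  simp only [pyMin_cons, List.foldl_cons]
  exact List.foldl_assoc

theorem drop_cons_getD (l : List Int) (k : Nat) (h : k < l.length) :
    l.drop k = l.getD k 0 :: l.drop (k + 1) := by
  rw [List.getD_eq_getElem l 0 h, List.drop_eq_getElem_cons h]

theorem pyMin_drop (l : List Int) (k : Nat) (h : k + 1 < l.length) :
    pyMin (l.drop k) = min (l.getD k 0) (pyMin (l.drop (k + 1))) := by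
  rw [drop_cons_getD l k (by omega), drop_cons_getD l (k + 1) h, pyMin_cons_cons]

theorem fgInner_eq (l : List Int) (m : Int) (jm : Nat) :
    ∀ (cnt a : Nat) (last : Nat), a ≤ jm → jm < a + cnt → l.getD jm 0 = m →
      (∀ t, a ≤ t → t < jm → l.getD t 0 ≠ m) →
      fgInner l m last (List.range' a cnt) = jm := by
  intro cnt
  induction cnt with
  | zero => intro a last h1 h2 _ _; exact absurd h2 (by omega)
  | succ n ih =>
    intro a last h1 h2 h3 h4
    rw [List.range'_succ, fgInner]
    by_cases hae : a = jm
    · subst hae; rw [if_pos h3]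
    · have hlt : a < jm := by omega
      rw [if_neg (h4 a le_rfl hlt)]
      exact ih (a + 1) a (by omega) (by omega) h3 (fun t ht => h4 t (by omega))

theorem loop_eq (l : List Int) :
    ∀ (K : Nat) (m : Int) (jm : Nat), K < l.length → FGInv l K m jm →
      fgOuter l K = fgAlt l m jm K := by
  intro K
  induction K with
  | zero => intro m jm _ _; rfl
  | succ k ih =>
    intro m jm hK hInv
    obtain ⟨hm, hjm1, hjm2, hjm3, hjm4⟩ := hInv
    have hslice : PySem.List.slice l (some ((k : Int) + 1)) none = l.drop (k + 1) := by
      have : ((k : Int) + 1) = ((k + 1 : Nat) : Int) := by push_cast; ring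
      rw [this, PySem.List.slice_from_natCast]
    rw [fgOuter, fgAlt]
    simp only [hslice, ← hm]
    by_cases hgt : m > l.getD k 0
    · rw [if_pos hgt, if_pos hgt]
      have hj : fgInner l m 0 (List.range' k (l.length - k)) = jm := by
        apply fgInner_eq l m jm (l.length - k) k 0 (by omega) (by omega) hjm3
        intro t ht1 ht2
        rcases Nat.eq_or_lt_of_le ht1 with h | h
        · subst h; omega
        · exact hjm4 t h ht2
      simp only [hj]
    · rw [if_neg hgt, if_neg hgt]
      by_cases hle : l.getD k 0 ≤ m
      · rw [if_pos hle]
        have heq : l.getD k 0 = m := le_antisymm hle (by omega)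
        apply ih
        · omega
        · refine ⟨?_, le_rfl, by omega, rfl, fun t ht1 ht2 => by omega⟩
          rw [pyMin_drop l k hK, ← hm, heq, min_self]
      · rw [if_neg hle]
        apply ih
        · omega
        · refine ⟨?_, by omega, hjm2, hjm3, fun t ht1 ht2 => ?_⟩
          · rw [pyMin_drop l k hK, ← hm, min_eq_right (by omega)]
          · rcases Nat.eq_or_lt_of_le ht1 with h | h
            · subst h; omega
            · exact hjm4 t h ht2

theorem find_greater_spec' (l : List Int) : find_greater l = find_greater_alt l := by
  unfold find_greater find_greater_alt
  rcases hn : l.length with _ | n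
  · rw [if_pos rfl]; rfl
  · rw [if_neg (by omega)]
    simp only [Nat.add_sub_cancel]
    apply loop_eq l n _ n (by omega)
    refine ⟨?_, le_rfl, by omega, rfl, fun t ht1 ht2 => by omega⟩
    have : l.drop n = [l.getD n 0] := by
      rw [drop_cons_getD l n (by omega)]
      simp [List.drop_eq_nil_of_le, hn]
    rw [this, pyMin_cons]; rfl

-- ===== VERDICT (by name: the statement is the Claim_ definition above) =====
theorem find_greater_spec : Claim_equal_find_greater := by
  intro l _
  exact (find_greater_spec' l).symm ▸ rfl
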